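-- pv_equiv track=rewrite | github.com/PF2100/FP-Project-IST | Project1/Project-1.py | validar_cod_crtl
-- ===== SOURCE A (Python) =====
-- def validar_cod_crtl(tuplo):
--     if not isinstance(tuplo,str) :
--         return False
--     if len(tuplo[1:-1])==5 and tuplo[0] == "[" and tuplo[-1] == "]":
--         for letra in tuplo[1:-1]:
--             if not 122>=ord(letra)>=97:
--                 return False
--         return True
--     return False
-- ===== SOURCE B (Python) =====
-- def validar_cod_crtl(tuplo):
--     # Single left-to-right DFA pass: no slicing, no length precheck.
--     if not isinstance(tuplo, str):
--         return False
--     state = 0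
--     for c in tuplo:
--         if state == 0:
--             state = 1 if c == '[' else -1
--         elif 1 <= state <= 5:
--             state = state + 1 if 'a' <= c <= 'z' else -1
--         elif state == 6:
--             state = 7 if c == ']' else -1
--         else:
--             state = -1
--     return state == 7
-- ===== Notes on version B (the rewrite author's own statement) =====
-- stated objective: alternative
-- what changed: Replaced A's slice/length/bracket checks plus per-character ord loop with a single left-to-right DFA pass (states 0..7 plus a dead state) over the string.
import Mathlib
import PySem

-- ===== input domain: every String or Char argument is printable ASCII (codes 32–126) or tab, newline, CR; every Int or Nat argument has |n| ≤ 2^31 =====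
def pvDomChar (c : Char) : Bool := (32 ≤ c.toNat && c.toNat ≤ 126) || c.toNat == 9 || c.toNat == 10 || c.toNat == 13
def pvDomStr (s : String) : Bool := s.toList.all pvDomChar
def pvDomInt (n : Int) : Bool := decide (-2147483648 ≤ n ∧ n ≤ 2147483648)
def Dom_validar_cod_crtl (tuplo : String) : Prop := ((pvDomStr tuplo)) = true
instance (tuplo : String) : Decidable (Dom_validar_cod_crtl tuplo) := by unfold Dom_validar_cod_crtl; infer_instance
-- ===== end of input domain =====

-- B replaces A's slice/length/bracket checks plus per-character ord loop with a single left-to-right DFA pass over the string (objective: alternative).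


-- ===== PORT A =====
-- 'for letra in tuplo[1:-1]: if not 122>=ord(letra)>=97: return False' then 'return True'
def pvALoop : List Char → Bool
  | [] => true
  | c :: rest => if ¬ (122 ≥ c.toNat ∧ c.toNat ≥ 97) then false else pvALoop rest

-- literal port of A (the 'isinstance(tuplo, str)' guard is vacuous for a String argument)
def validar_cod_crtl (tuplo : String) : Bool :=
  let mid := PySem.List.slice tuplo.toList (some 1) (some (-1))
  if mid.length = 5 ∧ PySem.List.pyGet? tuplo.toList 0 = some '[' ∧
      PySem.List.pyGet? tuplo.toList (-1) = some ']' then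
    pvALoop mid
  else false

-- ===== PORT B =====
-- one DFA transition: states 0 (start), 1..5 (after '[' plus state-1 letters), 6 (before ']'), 7 (accept), -1 (dead)
def pvStep (state : Int) (c : Char) : Int :=
  if state = 0 then (if c = '[' then 1 else -1)
  else if 1 ≤ state ∧ state ≤ 5 then (if 'a' ≤ c ∧ c ≤ 'z' then state + 1 else -1)
  else if state = 6 then (if c = ']' then 7 else -1)
  else -1

def validar_cod_crtl_alt (tuplo : String) : Bool :=
  decide (tuplo.toList.foldl pvStep 0 = 7)

-- ===== PRECONDITION & SPEC =====
def Spec_validar_cod_crtl (tuplo : String) (out : Bool) : Prop := out = validar_cod_crtl_alt tuplo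
instance (tuplo : String) (out : Bool) : Decidable (Spec_validar_cod_crtl tuplo out) := by unfold Spec_validar_cod_crtl; infer_instance

-- ===== CLAIM (what is proved, stated in full; the proofs are below) =====
def Claim_equal_validar_cod_crtl : Prop := ∀ (tuplo : String), Dom_validar_cod_crtl tuplo → Spec_validar_cod_crtl tuplo (validar_cod_crtl tuplo)

-- ===== LEMMAS AND PROOFS =====

-- B's Python compares characters ('a' <= c <= 'z'); A's Python compares code points (97..122): the same test
theorem char_range_bridge (c : Char) : ('a' ≤ c ∧ c ≤ 'z') ↔ (97 ≤ c.toNat ∧ c.toNat ≤ 122) := by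
  constructor
  · rintro ⟨h1, h2⟩; exact ⟨h1, h2⟩
  · rintro ⟨h1, h2⟩; exact ⟨h1, h2⟩

-- reaching the accepting state forces a nonnegative start and exactly 7 - s consumed characters
theorem pvStep_reach (l : List Char) : ∀ s : Int, l.foldl pvStep s = 7 → 0 ≤ s ∧ s + l.length = 7 := by
  induction l with
  | nil => intro s h; simp [List.foldl] at h; simp; omega
  | cons c t ih =>
    intro s h
    simp only [List.foldl] at h
    have h2 := ih (pvStep s c) h
    have hstep : (0 ≤ pvStep s c) → pvStep s c = s + 1 ∧ 0 ≤ s := by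
      unfold pvStep; split_ifs <;> omega
    have h3 := hstep h2.1
    simp only [List.length_cons]
    omega

-- the dead state is absorbing
theorem pvStep_absorb (l : List Char) : l.foldl pvStep (-1) = -1 := by
  induction l with
  | nil => rfl
  | cons c t ih => simpa [List.foldl, pvStep] using ih

theorem pvStep_eq_seven (s : Int) (c : Char) (h : pvStep s c = 7) : s = 6 := by
  unfold pvStep at h; split_ifs at h <;> omega

-- A's character loop is the all-lowercase test
theorem pvALoop_eq (m : List Char) : pvALoop m = decide (∀ c ∈ m, 97 ≤ c.toNat ∧ c.toNat ≤ 122) := by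
  induction m with
  | nil => simp [pvALoop]
  | cons c t ih =>
    by_cases hc : 97 ≤ c.toNat ∧ c.toNat ≤ 122
    · simp [pvALoop, hc, ih]
    · simp [pvALoop, hc]; omega

-- B's middle states: from state s (1 ≤ s, s + |m| = 6) the fold reaches 6 iff every character is a lowercase letter
theorem pvMid (m : List Char) : ∀ s : Int, 1 ≤ s → s + m.length = 6 →
    (m.foldl pvStep s = 6 ↔ ∀ c ∈ m, 97 ≤ c.toNat ∧ c.toNat ≤ 122) := by
  induction m with
  | nil => intro s h1 h2; simp at h2 ⊢; omega
  | cons c t ih =>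
    intro s h1 h2
    simp only [List.length_cons] at h2
    have hs5 : s ≤ 5 := by omega
    by_cases hc : 97 ≤ c.toNat ∧ c.toNat ≤ 122
    · have hstep : pvStep s c = s + 1 := by
        have : ('a' ≤ c ∧ c ≤ 'z') := (char_range_bridge c).mpr hc
        unfold pvStep; rw [if_neg (by omega), if_pos ⟨h1, hs5⟩, if_pos this]
      simp only [List.foldl, hstep]
      rw [ih (s+1) (by omega) (by omega)]
      simp [hc]
    · have hstep : pvStep s c = -1 := by
        have : ¬ ('a' ≤ c ∧ c ≤ 'z') := fun h => hc ((char_range_bridge c).mp h)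
        unfold pvStep; rw [if_neg (by omega), if_pos ⟨h1, hs5⟩, if_neg this]
      simp only [List.foldl, hstep, pvStep_absorb]
      constructor
      · intro h; omega
      · intro h; exact absurd (h c (by simp)) hc

-- A's body and B's body agree on every character list
theorem pv_key (l : List Char) :
    (if (PySem.List.slice l (some 1) (some (-1))).length = 5 ∧ PySem.List.pyGet? l 0 = some '[' ∧
        PySem.List.pyGet? l (-1) = some ']'
     then pvALoop (PySem.List.slice l (some 1) (some (-1))) else false)
    = decide (l.foldl pvStep 0 = 7) := by
  by_cases h7 : l.length = 7
  · obtain ⟨a,b,c,d,e,f,g,rfl⟩ : ∃ a b c d e f g, l = [a,b,c,d,e,f,g] := by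
      rcases l with _|⟨a,_|⟨b,_|⟨c,_|⟨d,_|⟨e,_|⟨f,_|⟨g,_|⟨h,t⟩⟩⟩⟩⟩⟩⟩⟩ <;> simp at h7
      exact ⟨a,b,c,d,e,f,g,rfl⟩
    have hs : PySem.List.slice [a,b,c,d,e,f,g] (some 1) (some (-1)) = [b,c,d,e,f] := rfl
    have h0 : PySem.List.pyGet? [a,b,c,d,e,f,g] 0 = some a := rfl
    have h1 : PySem.List.pyGet? [a,b,c,d,e,f,g] (-1) = some g := rfl
    rw [hs, h0, h1]
    by_cases ha : a = '['
    · subst ha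
      have hfold : ([('[':Char),b,c,d,e,f,g]).foldl pvStep 0
          = pvStep (([b,c,d,e,f]).foldl pvStep 1) g := by
        show (([b,c,d,e,f] ++ [g]).foldl pvStep (pvStep 0 '[')) = _
        rw [List.foldl_append]; rfl
      rw [hfold]
      by_cases hm : ∀ x ∈ [b,c,d,e,f], 97 ≤ Char.toNat x ∧ Char.toNat x ≤ 122
      · have h6 : ([b,c,d,e,f]).foldl pvStep 1 = 6 :=
          (pvMid [b,c,d,e,f] 1 (by norm_num) (by norm_num)).mpr hm
        rw [h6, pvALoop_eq]
        by_cases hg : g = ']'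
        · subst hg; simp [hm, pvStep]
        · have : pvStep 6 g = -1 := by unfold pvStep; rw [if_neg (by omega), if_neg (by omega), if_pos rfl, if_neg hg]
          simp [hg, this]
      · have h6 : ([b,c,d,e,f]).foldl pvStep 1 ≠ 6 := fun h =>
          hm ((pvMid [b,c,d,e,f] 1 (by norm_num) (by norm_num)).mp h)
        have hb : pvStep (([b,c,d,e,f]).foldl pvStep 1) g ≠ 7 := fun h => h6 (pvStep_eq_seven _ _ h)
        rw [pvALoop_eq, decide_eq_false hb]
        split_ifs
        · exact decide_eq_false hm
        · rfl
    · have hstep : pvStep 0 a = -1 := by unfold pvStep; rw [if_pos rfl, if_neg ha]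
      have : ([a,b,c,d,e,f,g]).foldl pvStep 0 = -1 := by
        show ([b,c,d,e,f,g]).foldl pvStep (pvStep 0 a) = -1
        rw [hstep]; exact pvStep_absorb _
      simp [ha, this]
  · have hc : ¬ ((PySem.List.slice l (some 1) (some (-1))).length = 5 ∧ PySem.List.pyGet? l 0 = some '[' ∧
        PySem.List.pyGet? l (-1) = some ']') := by
      rintro ⟨hlen, -, -⟩
      rw [PySem.List.length_slice] at hlen
      simp at hlen
      rcases Nat.lt_or_ge l.length 2 with h | h
      · interval_cases hl : l.length <;> simp_all
      · have : PySem.List.clampIdx l.length 1 = 1 := by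
          simp [PySem.List.clampIdx]; omega
        omega
    have hb : ¬ (l.foldl pvStep 0 = 7) := fun h => by
      have := pvStep_reach l 0 h; omega
    simp [hc, hb]

-- ===== VERDICT (by name: the statement is the Claim_ definition above) =====
theorem validar_cod_crtl_spec : Claim_equal_validar_cod_crtl := by
  intro tuplo _
  unfold Spec_validar_cod_crtl validar_cod_crtl validar_cod_crtl_alt
  exact pv_key tuplo.toList
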